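-- pv_equiv track=rewrite | github.com/justinrporter/schedulomicon | schedulomicon/util.py | accumulate_prior_counts
-- ===== SOURCE A (Python) =====
-- def accumulate_prior_counts(rotations, resident_config):
--
--     # options for 'history' are:
--     # 1) history: [Tutorial, Tutorial, Ortho, ..., Cardiac]
--
--     prior_counts = {r: 0 for r in resident_config.keys()}
--
--     for rotation in rotations:
--         for resident, params in resident_config.items():
--             if params and 'history' in params:
--                 for rot in params['history']:
--                     if rot == rotation:
--                         prior_counts[resident] += 1
--
--     return prior_counts
-- ===== SOURCE B (Python) =====
-- def accumulate_prior_counts(rotations, resident_config):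
--     # One pass per resident: build a multiplicity table of that resident's own
--     # history once, then sum lookups over rotations (inverts which side is indexed).
--     prior_counts = {}
--     for resident, params in resident_config.items():
--         if params and 'history' in params:
--             hist_counts = {}
--             for rot in params['history']:
--                 hist_counts[rot] = hist_counts.get(rot, 0) + 1
--             count = sum(hist_counts.get(rot, 0) for rot in rotations)
--         else:
--             count = 0
--         prior_counts[resident] = count
--     return prior_counts
-- ===== Notes on version B (the rewrite author's own statement) =====
-- stated objective: faster
-- what changed: Replaced A's rotations-outer triple loop that rescans every resident's whole history once per rotation with a single pass over residents that builds each resident's history multiplicity table once and then sums lookups over rotations.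
import Mathlib
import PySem

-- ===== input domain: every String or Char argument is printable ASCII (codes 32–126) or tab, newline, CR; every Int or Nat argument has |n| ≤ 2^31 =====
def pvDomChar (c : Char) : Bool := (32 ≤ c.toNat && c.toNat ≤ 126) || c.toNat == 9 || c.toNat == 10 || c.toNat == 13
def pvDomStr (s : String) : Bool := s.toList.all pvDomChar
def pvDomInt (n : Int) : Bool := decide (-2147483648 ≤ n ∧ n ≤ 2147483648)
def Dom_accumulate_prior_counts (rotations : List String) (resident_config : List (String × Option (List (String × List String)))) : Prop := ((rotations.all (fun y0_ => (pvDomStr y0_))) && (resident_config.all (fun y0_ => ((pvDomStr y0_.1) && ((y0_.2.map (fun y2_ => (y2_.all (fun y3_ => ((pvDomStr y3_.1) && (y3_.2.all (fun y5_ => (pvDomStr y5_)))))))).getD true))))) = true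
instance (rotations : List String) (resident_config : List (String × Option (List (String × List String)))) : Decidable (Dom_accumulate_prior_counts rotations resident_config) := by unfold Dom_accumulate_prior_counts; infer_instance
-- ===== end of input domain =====

-- B replaces A's rotations-outer triple loop by one pass over residents, building each
-- resident's history multiplicity table once and summing lookups over rotations (alternative).

-- ===== PORT A =====
-- inner 'for rot in params['history']: if rot == rotation: prior_counts[resident] += 1'
def pvA_hist (rotation r : String) (hist : List String) (pc : PySem.Dict String Int) : PySem.Dict String Int :=
  hist.foldl (fun pc rot => if rot == rotation then pc.modify r 0 (· + 1) else pc) pc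

-- body of 'for resident, params in resident_config.items():'
def pvA_body (rotation : String) (pc : PySem.Dict String Int) (itm : String × Option (List (String × List String))) : PySem.Dict String Int :=
  match itm.2 with
  | none => pc
  | some pl =>
    let params := PySem.Dict.ofList pl
    if params.size != 0 && params.contains "history" then
      match params.get? "history" with
      | some hist => pvA_hist rotation itm.1 hist pc
      | none => pc
    else pc

def accumulate_prior_counts (rotations : List String) (resident_config : List (String × Option (List (String × List String)))) : List (String × Int) :=
  let cfg := PySem.Dict.ofList resident_config
  let pc0 : PySem.Dict String Int := cfg.keys.foldl (fun d r => d.insert r 0) PySem.Dict.empty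
  (rotations.foldl (fun pc rotation => cfg.items.foldl (pvA_body rotation) pc) pc0).items

-- ===== PORT B =====
-- per-resident count: history multiplicity table once, then lookups over rotations
def pvB_count (rotations : List String) (params : Option (List (String × List String))) : Int :=
  match params with
  | none => 0
  | some pl =>
    let d := PySem.Dict.ofList pl
    if d.size != 0 && d.contains "history" then
      match d.get? "history" with
      | some hist =>
        let hc := hist.foldl (fun c rot => c.insert rot (c.getD rot 0 + 1)) PySem.Dict.empty
        rotations.foldl (fun s rot => s + hc.getD rot 0) 0
      | none => 0
    else 0

def accumulate_prior_counts_alt (rotations : List String) (resident_config : List (String × Option (List (String × List String)))) : List (String × Int) :=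
  let cfg := PySem.Dict.ofList resident_config
  (cfg.items.foldl (fun pc itm => pc.insert itm.1 (pvB_count rotations itm.2)) PySem.Dict.empty).items

-- ===== PRECONDITION & SPEC =====
def Spec_accumulate_prior_counts (rotations : List String) (resident_config : List (String × Option (List (String × List String)))) (out : List (String × Int)) : Prop := out = accumulate_prior_counts_alt rotations resident_config
instance (rotations : List String) (resident_config : List (String × Option (List (String × List String)))) (out : List (String × Int)) : Decidable (Spec_accumulate_prior_counts rotations resident_config out) := by unfold Spec_accumulate_prior_counts; infer_instance

-- ===== CLAIM (what is proved, stated in full; the proofs are below) =====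
def Claim_equal_accumulate_prior_counts : Prop := ∀ (rotations : List String) (resident_config : List (String × Option (List (String × List String)))), Dom_accumulate_prior_counts rotations resident_config → Spec_accumulate_prior_counts rotations resident_config (accumulate_prior_counts rotations resident_config)

-- ===== LEMMAS AND PROOFS =====

-- the history list A's guard selects, if any
def pvHist (params : Option (List (String × List String))) : Option (List String) :=
  match params with
  | none => none
  | some pl =>
    let d := PySem.Dict.ofList pl
    if d.size != 0 && d.contains "history" then d.get? "history" else none

-- how many times one rotation is counted for one resident entry
def pvCnt (params : Option (List (String × List String))) (rotation : String) : Int :=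
  match pvHist params with
  | some h => (h.count rotation : Int)
  | none => 0

theorem pvA_hist_getD (rotation r : String) (hist : List String)
    (pc : PySem.Dict String Int) (k : String) :
    (pvA_hist rotation r hist pc).getD k 0
      = pc.getD k 0 + (if k = r then (hist.count rotation : Int) else 0) := by
  induction hist generalizing pc with
  | nil => simp [pvA_hist]
  | cons rot hist ih =>
    simp only [pvA_hist, List.foldl_cons] at *
    by_cases hrr : (rot == rotation) = true
    · rw [if_pos hrr, ih, PySem.Dict.getD_modify]
      have hcc : (rot :: hist).count rotation = hist.count rotation + 1 := by
        simp [List.count_cons, hrr]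
      rw [hcc]
      split_ifs with hk
      · subst hk; push_cast; ring
      · ring_nf
    · rw [if_neg hrr, ih]
      have hcc : (rot :: hist).count rotation = hist.count rotation := by
        simp [List.count_cons, hrr]
      rw [hcc]

theorem pvA_hist_keys (rotation r : String) (hist : List String)
    (pc : PySem.Dict String Int) (hr : r ∈ pc.keys) :
    (pvA_hist rotation r hist pc).keys = pc.keys := by
  induction hist generalizing pc with
  | nil => simp [pvA_hist]
  | cons rot hist ih =>
    simp only [pvA_hist, List.foldl_cons] at *
    by_cases hrr : (rot == rotation) = true
    · rw [if_pos hrr]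
      have hc : pc.contains r = true := by
        rw [PySem.Dict.contains_iff_mem_keys]; exact hr
      have hkeys : (pc.modify r 0 (· + 1)).keys = pc.keys := by
        rw [PySem.Dict.keys_modify, PySem.Dict.keys_insert_of_contains _ _ hc]
      rw [ih _ (by rw [hkeys]; exact hr), hkeys]
    · rw [if_neg hrr]
      exact ih _ hr

theorem pvA_body_getD (rotation : String) (pc : PySem.Dict String Int)
    (itm : String × Option (List (String × List String))) (k : String) :
    (pvA_body rotation pc itm).getD k 0
      = pc.getD k 0 + (if k = itm.1 then pvCnt itm.2 rotation else 0) := by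
  obtain ⟨r, params⟩ := itm
  cases params with
  | none => simp [pvA_body, pvCnt, pvHist]
  | some pl =>
    by_cases hcond : ((PySem.Dict.ofList pl).size != 0 && (PySem.Dict.ofList pl).contains "history") = true
    · cases hg : (PySem.Dict.ofList pl).get? "history" with
      | none => simp [pvA_body, pvCnt, pvHist, hcond, hg]
      | some hist => simp [pvA_body, pvCnt, pvHist, hcond, hg, pvA_hist_getD]
    · simp [pvA_body, pvCnt, pvHist, hcond]

theorem pvA_body_keys (rotation : String) (pc : PySem.Dict String Int)
    (itm : String × Option (List (String × List String))) (hr : itm.1 ∈ pc.keys) :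
    (pvA_body rotation pc itm).keys = pc.keys := by
  obtain ⟨r, params⟩ := itm
  cases params with
  | none => simp [pvA_body]
  | some pl =>
    by_cases hcond : ((PySem.Dict.ofList pl).size != 0 && (PySem.Dict.ofList pl).contains "history") = true
    · cases hg : (PySem.Dict.ofList pl).get? "history" with
      | none => simp [pvA_body, hcond, hg]
      | some hist =>
        simp only [pvA_body, hcond, hg, if_pos]
        exact pvA_hist_keys _ _ _ _ hr
    · simp [pvA_body, hcond]

theorem pvA_inner_keys (rotation : String)
    (items : List (String × Option (List (String × List String))))
    (pc : PySem.Dict String Int) (h : ∀ itm ∈ items, itm.1 ∈ pc.keys) :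
    (items.foldl (pvA_body rotation) pc).keys = pc.keys := by
  induction items generalizing pc with
  | nil => rfl
  | cons itm items ih =>
    simp only [List.foldl_cons]
    have hk : (pvA_body rotation pc itm).keys = pc.keys :=
      pvA_body_keys _ _ _ (h itm (List.mem_cons_self ..))
    rw [ih _ (fun i hi => by rw [hk]; exact h i (List.mem_cons_of_mem _ hi)), hk]

theorem pvA_inner_getD (rotation : String)
    (items : List (String × Option (List (String × List String))))
    (pc : PySem.Dict String Int) (k : String) :
    (items.foldl (pvA_body rotation) pc).getD k 0
      = pc.getD k 0 + ((items.filter (fun itm => itm.1 == k)).map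
          (fun itm => pvCnt itm.2 rotation)).sum := by
  induction items generalizing pc with
  | nil => simp
  | cons itm items ih =>
    simp only [List.foldl_cons]
    rw [ih, pvA_body_getD]
    by_cases hk : itm.1 == k
    · have hk' : k = itm.1 := (beq_iff_eq.mp hk).symm
      simp [hk, if_pos hk']
      ring
    · have hk' : ¬ (k = itm.1) := fun h => hk (beq_iff_eq.mpr h.symm)
      simp [hk, if_neg hk']

theorem pvA_outer_getD (rotations : List String)
    (items : List (String × Option (List (String × List String))))
    (pc : PySem.Dict String Int) (k : String) :
    (rotations.foldl (fun pc rotation => items.foldl (pvA_body rotation) pc) pc).getD k 0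
      = pc.getD k 0 + (rotations.map (fun rotation =>
          ((items.filter (fun itm => itm.1 == k)).map
            (fun itm => pvCnt itm.2 rotation)).sum)).sum := by
  induction rotations generalizing pc with
  | nil => simp
  | cons rotation rotations ih =>
    simp only [List.foldl_cons, List.map_cons, List.sum_cons]
    rw [ih, pvA_inner_getD]
    ring

theorem pvA_outer_keys (rotations : List String)
    (items : List (String × Option (List (String × List String))))
    (pc : PySem.Dict String Int) (h : ∀ itm ∈ items, itm.1 ∈ pc.keys) :
    (rotations.foldl (fun pc rotation => items.foldl (pvA_body rotation) pc) pc).keys = pc.keys := by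
  induction rotations generalizing pc with
  | nil => rfl
  | cons rotation rotations ih =>
    simp only [List.foldl_cons]
    have hk := pvA_inner_keys rotation items pc h
    rw [ih _ (fun i hi => by rw [hk]; exact h i hi), hk]

theorem pvPc0_getD (l : List String) (d : PySem.Dict String Int) (k : String) :
    (l.foldl (fun d r => d.insert r 0) d).getD k 0
      = if k ∈ l then 0 else d.getD k 0 := by
  induction l generalizing d with
  | nil => simp
  | cons r l ih =>
    simp only [List.foldl_cons]
    rw [ih]
    rw [PySem.Dict.getD_insert]
    by_cases hkl : k ∈ l
    · simp [hkl]
    · by_cases hkr : k = r <;> simp [hkl, hkr]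

theorem pvB_count_eq (rotations : List String)
    (params : Option (List (String × List String))) :
    pvB_count rotations params
      = (rotations.map (fun rotation => pvCnt params rotation)).sum := by
  cases params with
  | none => simp [pvB_count, pvCnt, pvHist]
  | some pl =>
    by_cases hcond : ((PySem.Dict.ofList pl).size != 0 && (PySem.Dict.ofList pl).contains "history") = true
    · cases hg : (PySem.Dict.ofList pl).get? "history" with
      | none => simp [pvB_count, pvCnt, pvHist, hcond, hg]
      | some hist =>
        simp only [pvB_count, pvCnt, pvHist, hcond, hg, if_pos]
        rw [PySem.Dict.foldl_insert_getD_add_one_eq_counter]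
        have : ∀ (a : Int), rotations.foldl
            (fun s rot => s + (PySem.Dict.counter hist).getD rot 0) a
            = a + (rotations.map (fun rot => ((hist.count rot : Int)))).sum := by
          intro a
          induction rotations generalizing a with
          | nil => simp
          | cons rot rots ih =>
            simp only [List.foldl_cons, List.map_cons, List.sum_cons]
            rw [ih, PySem.Dict.getD_counter]
            ring
        rw [this]; simp
    · simp [pvB_count, pvCnt, pvHist, hcond]

theorem pvFilter_fst_single {β : Type} (l : List (String × β))
    (hnd : (l.map Prod.fst).Nodup) (itm : String × β) (hm : itm ∈ l) :
    l.filter (fun x => x.1 == itm.1) = [itm] := by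
  induction l with
  | nil => cases hm
  | cons a l ih =>
    simp only [List.map_cons, List.nodup_cons] at hnd
    rcases List.mem_cons.mp hm with h | h
    · subst h
      have : l.filter (fun x => x.1 == itm.1) = [] := by
        apply List.filter_eq_nil_iff.mpr
        intro x hx hbx
        exact hnd.1 (by rw [← beq_iff_eq.mp hbx]; exact List.mem_map_of_mem hx)
      simp [this]
    · have hne : ¬ (a.1 == itm.1) := by
        intro hb
        exact hnd.1 (by rw [beq_iff_eq.mp hb]; exact List.mem_map_of_mem h)
      simp only [List.filter_cons, hne]
      simpa using ih hnd.2 h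

-- ===== VERDICT (by name: the statement is the Claim_ definition above) =====
theorem accumulate_prior_counts_spec : Claim_equal_accumulate_prior_counts := by
  intro rotations resident_config _
  unfold Spec_accumulate_prior_counts accumulate_prior_counts accumulate_prior_counts_alt
  set cfg := PySem.Dict.ofList resident_config with hcfg
  have hnd : cfg.keys.Nodup := PySem.Dict.nodup_keys_ofList resident_config
  -- B's dict: fresh distinct keys append
  have hB : ((cfg.items.foldl (fun pc itm => pc.insert itm.1 (pvB_count rotations itm.2))
      PySem.Dict.empty)).items
      = cfg.items.map (fun itm => (itm.1, pvB_count rotations itm.2)) := by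
    have := PySem.Dict.items_foldl_insert_fresh (l := cfg.items) (d := PySem.Dict.empty)
      (k := fun itm => itm.1) (v := fun itm => pvB_count rotations itm.2)
      (by intro a _; exact PySem.Dict.contains_empty _) (by exact hnd)
    simpa using this
  rw [hB]
  -- A's dict
  set pc0 : PySem.Dict String Int := cfg.keys.foldl (fun d r => d.insert r 0) PySem.Dict.empty with hpc0
  have hpc0keys : pc0.keys = cfg.keys := by
    rw [hpc0, PySem.Dict.keys_foldl_insert]
    rw [PySem.Dict.keys_empty, PySem.Set.update_nil_left]
    exact PySem.Set.ofList_eq_self_of_nodup _ hnd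
  set Ad := rotations.foldl (fun pc rotation => cfg.items.foldl (pvA_body rotation) pc) pc0 with hAd
  have hmemkeys : ∀ itm ∈ cfg.items, itm.1 ∈ pc0.keys := by
    intro itm hi
    rw [hpc0keys]
    exact PySem.Dict.mem_keys_of_mem_items cfg hi
  have hAkeys : Ad.keys = cfg.keys := by rw [hAd, pvA_outer_keys _ _ _ hmemkeys, hpc0keys]
  have hAitems : Ad.items = Ad.keys.map (fun k => (k, Ad.getD k 0)) :=
    PySem.Dict.items_eq_map_keys Ad (by rw [hAkeys]; exact hnd) 0
  rw [hAitems, hAkeys]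
  have hkeys_eq : cfg.keys = cfg.items.map Prod.fst := rfl
  rw [hkeys_eq, List.map_map]
  apply List.map_congr_left
  intro itm hi
  simp only [Function.comp_apply]
  congr 1
  rw [hAd, pvA_outer_getD, hpc0, pvPc0_getD]
  rw [pvFilter_fst_single cfg.items (by rw [← hkeys_eq]; exact hnd) itm hi]
  rw [pvB_count_eq]
  simp
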